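-- pv_equiv track=rewrite | github.com/Marshal1101/DataStructure-Algorithm-Study | baekjoon/ImplementationQuestion2/094-2621-카드게임.py | chk_count
-- ===== SOURCE A (Python) =====
-- def chk_count(card):
--     count = dict()
--     for num, color in card:
--         if num in count:
--             count[num] += 1
--         else:
--             count[num] = 1
--     count = list(count.items())
--     count.sort(key=lambda x: (x[1], x[0]), reverse=True)
--     ret = 0
--     if count[1][1] == 2:
--         if count[0][1] == 3:
--             ret += count[0][0] * 10
--             ret += count[1][0]
--             ret += 700
--         elif count[0][1] == 2:
--             ret += count[0][0] * 10
--             ret += count[1][0]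
--             ret += 300
--     elif count[0][1] == 4:
--         ret += count[0][0]
--         ret += 800
--     elif count[0][1] == 3:
--         ret += count[0][0]
--         ret += 400
--     elif count[0][1] == 2:
--         ret += count[0][0]
--         ret += 200
--     else:
--         ret += count[0][0]
--         ret += 100
--     return ret
-- ===== SOURCE B (Python) =====
-- def chk_count(card):
--     # One pass over the frequency table keeping only the top-2 (count, value)
--     # pairs; no sorted list is ever built.
--     freq = {}
--     for num, color in card:
--         freq[num] = freq.get(num, 0) + 1
--     best = None
--     second = None
--     for num, cnt in freq.items():
--         p = (cnt, num)
--         if best is None or p > best: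
--             second = best
--             best = p
--         elif second is None or p > second:
--             second = p
--     if second is None:
--         raise ValueError("need at least two distinct card values")
--     c0, v0 = best
--     c1, v1 = second
--     if c1 == 2:
--         if c0 == 3:
--             return v0 * 10 + v1 + 700
--         if c0 == 2:
--             return v0 * 10 + v1 + 300
--         return 0
--     if c0 == 4:
--         return v0 + 800
--     if c0 == 3:
--         return v0 + 400
--     if c0 == 2:
--         return v0 + 200
--     return v0 + 100
-- ===== Notes on version B (the rewrite author's own statement) =====
-- stated objective: alternative
-- what changed: B replaces A's build-dict / sort-all-entries-by-(count,value) / index-the-sorted-list pipeline by a single top-2 scan over the frequency table that keeps only the best and second-best (count,value) pairs, dispatching on those two pairs directly.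
import Mathlib
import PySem

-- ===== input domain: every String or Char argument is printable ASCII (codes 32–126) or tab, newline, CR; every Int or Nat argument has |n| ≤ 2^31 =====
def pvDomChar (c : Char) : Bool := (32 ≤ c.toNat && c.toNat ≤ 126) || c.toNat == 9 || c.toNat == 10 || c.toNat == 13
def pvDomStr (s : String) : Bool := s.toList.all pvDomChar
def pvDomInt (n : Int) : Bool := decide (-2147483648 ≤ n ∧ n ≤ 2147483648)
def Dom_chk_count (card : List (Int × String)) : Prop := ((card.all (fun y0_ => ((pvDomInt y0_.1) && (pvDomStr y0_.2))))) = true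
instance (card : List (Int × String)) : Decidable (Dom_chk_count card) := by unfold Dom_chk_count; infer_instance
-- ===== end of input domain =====

-- B replaces A's full sort of the frequency table by a single top-2 scan (simpler dispatch, no sorted list).


-- ===== PORT A =====
def chk_count (card : List (Int × String)) : Int :=
  let count := card.foldl
    (fun d p => if d.contains p.1 then d.insert p.1 (d.getD p.1 0 + 1) else d.insert p.1 1)
    (PySem.Dict.empty : PySem.Dict Int Int)
  let s := PySem.List.sorted2 count.items (fun x => x.2) (fun x => x.1) true
  match PySem.List.pyGet? s 1, PySem.List.pyGet? s 0 with
  | some c1, some c0 =>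
    if c1.2 == 2 then
      if c0.2 == 3 then c0.1 * 10 + c1.1 + 700
      else if c0.2 == 2 then c0.1 * 10 + c1.1 + 300
      else 0
    else if c0.2 == 4 then c0.1 + 800
    else if c0.2 == 3 then c0.1 + 400
    else if c0.2 == 2 then c0.1 + 200
    else c0.1 + 100
  | _, _ => 0  -- count[1] raises IndexError in Python; excluded by Pre_chk_count

-- ===== PORT B =====
-- Python tuple comparison p > q on (Int, Int) pairs (lexicographic)
def pairGt (p q : Int × Int) : Bool := p.1 > q.1 || (p.1 == q.1 && p.2 > q.2)

-- the body of B's top-2 loop: state = (best, second)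
def top2Step (st : Option (Int × Int) × Option (Int × Int)) (z : Int × Int) :
    Option (Int × Int) × Option (Int × Int) :=
  let p := (z.2, z.1)
  match st.1, st.2 with
  | none, none => (some p, none)
  | none, some _ => (some p, none)
  | some b, none => if pairGt p b then (some p, some b) else (some b, some p)
  | some b, some sec =>
    if pairGt p b then (some p, some b)
    else if pairGt p sec then (some b, some p)
    else (some b, some sec)

-- the final dispatch of Source B on (best, second)
def top2Score (r : Option (Int × Int) × Option (Int × Int)) : Int :=
  match r.1, r.2 with
  | some b, some sec =>
    let c0 := b.1; let v0 := b.2; let c1 := sec.1; let v1 := sec.2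
    if c1 == 2 then
      if c0 == 3 then v0 * 10 + v1 + 700
      else if c0 == 2 then v0 * 10 + v1 + 300
      else 0
    else if c0 == 4 then v0 + 800
    else if c0 == 3 then v0 + 400
    else if c0 == 2 then v0 + 200
    else v0 + 100
  | some _, none => 0  -- Source B raises ValueError here; excluded by Pre_chk_count
  | none, none => 0
  | none, some _ => 0

def chk_count_alt (card : List (Int × String)) : Int :=
  let freq := card.foldl (fun d p => d.insert p.1 (d.getD p.1 0 + 1))
    (PySem.Dict.empty : PySem.Dict Int Int)
  top2Score (freq.items.foldl top2Step (none, none))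

-- ===== PRECONDITION & SPEC =====
-- Pre_ excludes hands with fewer than two distinct card values: there Python A raises
-- IndexError at count[1] (and B raises ValueError).
def Pre_chk_count (card : List (Int × String)) : Prop :=
  ∃ p ∈ card, ∃ q ∈ card, p.1 ≠ q.1
instance (card : List (Int × String)) : Decidable (Pre_chk_count card) := by
  unfold Pre_chk_count; infer_instance

def pvWitness_chk_count : (List (Int × String)) :=
  [(7, "R"), (7, "B"), (3, "Y"), (3, "G"), (5, "R")]

def Spec_chk_count (card : List (Int × String)) (out : Int) : Prop := out = chk_count_alt card
instance (card : List (Int × String)) (out : Int) : Decidable (Spec_chk_count card out) := by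
  unfold Spec_chk_count; infer_instance

-- ===== CLAIM (what is proved, stated in full; the proofs are below) =====
def Claim_equal_chk_count : Prop :=
  ∀ (card : List (Int × String)), Dom_chk_count card → Pre_chk_count card →
    Spec_chk_count card (chk_count card)

-- ===== LEMMAS AND PROOFS =====

-- the comparison A's sort uses (sorted2's `before` with reverse=True, key (x.2, x.1))
def sortBefore (z y : Int × Int) : Bool :=
  decide (y.2 < z.2) || (!decide (z.2 < y.2) && decide (y.1 < z.1))

-- first two elements of the sorted list, swapped into B's (count, value) shape
def firstTwo (m : List (Int × Int)) : Option (Int × Int) × Option (Int × Int) :=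
  (m[0]?.map (fun z => (z.2, z.1)), m[1]?.map (fun z => (z.2, z.1)))

theorem pairGt_eq_sortBefore (z y : Int × Int) :
    pairGt (z.2, z.1) (y.2, y.1) = sortBefore z y := by
  simp only [pairGt, sortBefore]
  by_cases h1 : y.2 < z.2 <;> by_cases h2 : z.2 < y.2 <;>
    simp [h1, h2] <;> omega

theorem top2Step_firstTwo (m : List (Int × Int)) (z : Int × Int) :
    top2Step (firstTwo m) z = firstTwo (PySem.List.insertBy sortBefore z m) := by
  match m with
  | [] => rfl
  | [a] =>
    simp only [firstTwo, top2Step, PySem.List.insertBy, ← pairGt_eq_sortBefore]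
    by_cases h : pairGt (z.2, z.1) (a.2, a.1) <;> simp [h]
  | a :: b :: t =>
    simp only [firstTwo, top2Step, PySem.List.insertBy, ← pairGt_eq_sortBefore]
    by_cases ha : pairGt (z.2, z.1) (a.2, a.1) <;>
      by_cases hb : pairGt (z.2, z.1) (b.2, b.1) <;>
      simp [ha, hb]

theorem top2_eq_firstTwo_sort (l : List (Int × Int)) :
    l.foldl top2Step (none, none) =
      firstTwo (PySem.List.sorted2 l (fun x => x.2) (fun x => x.1) true) := by
  show _ = firstTwo (l.foldl (fun acc x => PySem.List.insertBy sortBefore x acc) [])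
  induction l using List.reverseRecOn with
  | nil => rfl
  | append_singleton l z ih =>
    simp only [List.foldl_append, List.foldl_cons, List.foldl_nil, ih, top2Step_firstTwo]

theorem pyGet_two_zero (a b : Int × Int) (t : List (Int × Int)) :
    PySem.List.pyGet? (a :: b :: t) 0 = some a := by
  simp [pysem]

theorem pyGet_two_one (a b : Int × Int) (t : List (Int × Int)) :
    PySem.List.pyGet? (a :: b :: t) 1 = some b := by
  simp [PySem.List.pyGet?, PySem.List.pyIdx?]

theorem count_step_eq (d : PySem.Dict Int Int) (p : Int × String) :
    (if d.contains p.1 then d.insert p.1 (d.getD p.1 0 + 1) else d.insert p.1 1)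
      = d.insert p.1 (d.getD p.1 0 + 1) := by
  by_cases hc : d.contains p.1 = true
  · rw [if_pos hc]
  · have hnone : d.get? p.1 = none := by
      have hs := PySem.Dict.contains_eq_isSome_get? d p.1
      cases hget : d.get? p.1 with
      | none => rfl
      | some v => rw [hget] at hs; simp at hs; exact absurd hs hc
    have hg : d.getD p.1 0 = 0 := by simp [PySem.Dict.getD, hnone]
    rw [if_neg hc, hg]; norm_num

theorem count_foldl_eq (card : List (Int × String)) (d : PySem.Dict Int Int) :
    card.foldl
      (fun d p => if d.contains p.1 then d.insert p.1 (d.getD p.1 0 + 1) else d.insert p.1 1) d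
    = card.foldl (fun d p => d.insert p.1 (d.getD p.1 0 + 1)) d := by
  simp only [count_step_eq]

-- ===== VERDICT (by name: the statement is the Claim_ definition above) =====
theorem chk_count_spec : Claim_equal_chk_count := by
  intro card _ _
  unfold Spec_chk_count chk_count chk_count_alt
  simp only [count_foldl_eq, top2_eq_firstTwo_sort]
  cases hm : PySem.List.sorted2
      (card.foldl (fun d p => d.insert p.1 (d.getD p.1 0 + 1))
        (PySem.Dict.empty : PySem.Dict Int Int)).items
      (fun x => x.2) (fun x => x.1) true with
  | nil => rfl
  | cons a m' =>
    cases m' with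
    | nil => rfl
    | cons b t => rw [pyGet_two_zero, pyGet_two_one]; rfl
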